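-- pv_equiv track=rewrite | github.com/si21lvi/LaboratorioColecciones | custom_functions/temperature_methods.py | meses_caliente
-- ===== SOURCE A (Python) =====
-- def meses_caliente (lista):
--     tt=lista[0]
--     posicion=0
--     for i in range (0,len(lista)):
--      if lista[i] > tt:
--          tt= lista[i]
--          posicion =lista.index(tt)
--     if posicion==0:
--         return("En el mes de Enero")
--     if posicion==1:
--         return("En el mes de Febrero")
--     if posicion==2:
--         return("En el mes de Marzo")
--     if posicion==3:
--         return("En el mes de Abril")
--     if posicion==4:
--         return("En el mes de Mayo")
--     if posicion==5:
--         return("En el mes de Junio")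
--     if posicion==6:
--         return("En el mes de Julio")
--     if posicion==7:
--         return("En el mes de Agosto")
--     if posicion==8:
--         return("En el mes de Septiembre")
--     if posicion==9:
--         return ("En el mes de Octubre")
--     if posicion==10:
--         return ("En el mes de Noviembre")
--     if posicion==11:
--         return("En el mes de Diciembre")
-- ===== SOURCE B (Python) =====
-- MESES = ['Enero', 'Febrero', 'Marzo', 'Abril', 'Mayo', 'Junio',
--          'Julio', 'Agosto', 'Septiembre', 'Octubre', 'Noviembre', 'Diciembre']
--
--
-- def meses_caliente(lista):
--     pos = lista.index(max(lista))
--     return 'En el mes de ' + MESES[pos]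
-- ===== Notes on version B (the rewrite author's own statement) =====
-- stated objective: idiomatic
-- what changed: B replaces A's manual running-max loop with repeated lista.index calls and the 12-branch if-chain by a single max()+list.index() pass and a month-name table lookup.
-- outside the precondition, e.g. on meses_caliente([0, 0, 0, 0, 0, 0, 0, 0, 0, 0, 0, 0, 9]): A returns None, B raises IndexError
import Mathlib
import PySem

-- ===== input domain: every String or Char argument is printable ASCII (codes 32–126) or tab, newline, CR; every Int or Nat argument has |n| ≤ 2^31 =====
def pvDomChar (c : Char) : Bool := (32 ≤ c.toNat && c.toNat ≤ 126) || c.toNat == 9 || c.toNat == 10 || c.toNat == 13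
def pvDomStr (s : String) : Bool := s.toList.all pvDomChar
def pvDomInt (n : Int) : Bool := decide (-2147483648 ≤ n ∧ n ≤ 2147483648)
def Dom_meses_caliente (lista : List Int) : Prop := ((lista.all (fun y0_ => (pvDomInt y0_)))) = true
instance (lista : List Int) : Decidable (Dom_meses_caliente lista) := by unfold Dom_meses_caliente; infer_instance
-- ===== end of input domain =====

-- B computes the winner with max()+list.index() and a month table instead of A's
-- running-max loop with repeated lista.index and a 12-branch if-chain (objective: idiomatic).

-- ===== PORT A =====
def meses_caliente (lista : List Int) : String :=
  match PySem.List.pyGet? lista 0 with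
  | none => ""  -- lista[0] raises IndexError on []; excluded by Pre_
  | some tt0 =>
    let st := (PySem.List.pyRange 0 (lista.length : Int) 1).foldl
      (fun (st : Int × Nat) i =>
        let v := PySem.List.pyGetD lista i 0   -- lista[i]; i ∈ range(len(lista)), in range
        if v > st.1 then (v, (PySem.List.index? lista v).getD 0) else st)
      (tt0, 0)
    let posicion := st.2
    if posicion = 0 then "En el mes de Enero"
    else if posicion = 1 then "En el mes de Febrero"
    else if posicion = 2 then "En el mes de Marzo"
    else if posicion = 3 then "En el mes de Abril"
    else if posicion = 4 then "En el mes de Mayo"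
    else if posicion = 5 then "En el mes de Junio"
    else if posicion = 6 then "En el mes de Julio"
    else if posicion = 7 then "En el mes de Agosto"
    else if posicion = 8 then "En el mes de Septiembre"
    else if posicion = 9 then "En el mes de Octubre"
    else if posicion = 10 then "En el mes de Noviembre"
    else if posicion = 11 then "En el mes de Diciembre"
    else ""  -- Python falls through and returns None here; excluded by Pre_

-- ===== PORT B =====
def pvMESES : List String :=
  ["Enero", "Febrero", "Marzo", "Abril", "Mayo", "Junio",
   "Julio", "Agosto", "Septiembre", "Octubre", "Noviembre", "Diciembre"]

def meses_caliente_alt (lista : List Int) : String :=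
  match PySem.List.max? lista (fun y => y) with
  | none => ""  -- max([]) raises ValueError; excluded by Pre_
  | some m =>
    match PySem.List.index? lista m with
    | none => ""  -- unreachable: m ∈ lista
    | some pos =>
      match PySem.List.pyGet? pvMESES (pos : Int) with
      | none => ""  -- MESES[pos] raises IndexError for pos ≥ 12; excluded by Pre_
      | some mes => "En el mes de " ++ mes

-- ===== PRECONDITION & SPEC =====
-- Pre_ excludes the empty list (A raises IndexError) and lists whose maximum first
-- occurs at index ≥ 12 (A falls through the if-chain and returns None, not a string;
-- B raises IndexError there).
def Pre_meses_caliente (lista : List Int) : Prop :=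
  lista ≠ [] ∧ ((PySem.List.index? lista (lista.foldl max (lista.headD 0))).getD 0) < 12
instance (lista : List Int) : Decidable (Pre_meses_caliente lista) := by
  unfold Pre_meses_caliente; infer_instance

def pvWitness_meses_caliente : List Int := [3, 1, 5, 5, 2]

def Spec_meses_caliente (lista : List Int) (out : String) : Prop := out = meses_caliente_alt lista
instance (lista : List Int) (out : String) : Decidable (Spec_meses_caliente lista out) := by
  unfold Spec_meses_caliente; infer_instance

-- ===== CLAIM =====
def Claim_equal_meses_caliente : Prop :=
  ∀ (lista : List Int), Dom_meses_caliente lista → Pre_meses_caliente lista →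
    Spec_meses_caliente lista (meses_caliente lista)

-- ===== LEMMAS AND PROOFS =====

-- A's loop: the accumulator is always (running max, first index in lista of that max).
theorem pv_loop_inv (lista : List Int) (l : List Int) (a : Int) :
    l.foldl (fun (st : Int × Nat) v =>
        if v > st.1 then (v, (PySem.List.index? lista v).getD 0) else st)
      (a, (PySem.List.index? lista a).getD 0)
    = (l.foldl max a, (PySem.List.index? lista (l.foldl max a)).getD 0) := by
  induction l generalizing a with
  | nil => rfl
  | cons v l ih =>
    simp only [List.foldl_cons]
    by_cases h : v > a
    · rw [if_pos h, max_eq_right (le_of_lt h), ih]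
    · rw [if_neg h, max_eq_left (not_lt.mp h), ih]

theorem meses_caliente_spec_aux (lista : List Int) (h : Pre_meses_caliente lista) :
    meses_caliente lista = meses_caliente_alt lista := by
  match lista with
  | [] => exact absurd h.1 (by simp)
  | x :: t =>
    unfold meses_caliente meses_caliente_alt
    rw [PySem.List.pyGet?_zero_cons]
    simp only
    rw [PySem.List.foldl_pyRange_zero_pyGetD' (x :: t) 0
      (fun (st : Int × Nat) v =>
        if v > st.1 then (v, (PySem.List.index? (x :: t) v).getD 0) else st) (x, 0)]
    have h0 : (PySem.List.index? (x :: t) x).getD 0 = 0 := by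
      rw [PySem.List.index?_cons_self]; rfl
    have hfold := pv_loop_inv (x :: t) (x :: t) x
    rw [h0] at hfold
    rw [hfold]
    simp only [List.foldl_cons, max_self]
    set M := t.foldl max x with hM
    have hmem : M ∈ x :: t := by
      rcases PySem.List.foldl_max_mem t x with h1 | h1
      · rw [hM, h1]; exact List.mem_cons_self
      · exact List.mem_cons_of_mem _ h1
    have hmax : PySem.List.max? (x :: t) (fun y => y) = some M := by
      rw [PySem.List.max?_id_cons]
    obtain ⟨k, hk⟩ : ∃ k, PySem.List.index? (x :: t) M = some k :=
      Option.isSome_iff_exists.mp ((PySem.List.index?_isSome_iff _ _).mpr hmem)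
    have hk12 : k < 12 := by
      have h2 := h.2
      simp only [List.headD_cons, List.foldl_cons, max_self, ← hM, hk, Option.getD_some] at h2
      exact h2
    rw [hmax, hk]
    simp only [hk, Option.getD_some]
    interval_cases k <;> rfl

-- ===== VERDICT =====
theorem meses_caliente_spec : Claim_equal_meses_caliente := by
  intro lista _ hpre
  unfold Spec_meses_caliente
  exact meses_caliente_spec_aux lista hpre
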